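-- pv_equiv track=rewrite | github.com/fay85/IS-ASGD | scripts/print_iterative.py | get_improved
-- ===== SOURCE A (Python) =====
-- def get_improved(z):
--     best=100
--     y=[]
--     x=[]
--     for i,data in enumerate(z):
--         y.append(data)
--         x.append(i)
--     improved_x=[]
--     improved_y=[]
--     for i,yi in enumerate(y):
--         if yi<best:
--             improved_y.append(yi)
--             improved_x.append(x[i])
--             best=yi
--     return improved_x,improved_y
-- ===== SOURCE B (Python) =====
-- def get_improved(z):
--     # Materialize the prefix-minima table (seeded at 100), then select drop points pairwise.
--     p = [100]
--     for d in z: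
--         p.append(d if d < p[-1] else p[-1])
--     improved_x = [i for i in range(len(z)) if p[i + 1] < p[i]]
--     improved_y = [p[i + 1] for i in improved_x]
--     return improved_x, improved_y
-- ===== Notes on version B (the rewrite author's own statement) =====
-- stated objective: alternative
-- what changed: B replaces A's two enumerate loops with a scalar running best by first materializing the full prefix-minima table seeded at 100 and then selecting, in a pairwise second pass, the positions where the table strictly drops.
import Mathlib
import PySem

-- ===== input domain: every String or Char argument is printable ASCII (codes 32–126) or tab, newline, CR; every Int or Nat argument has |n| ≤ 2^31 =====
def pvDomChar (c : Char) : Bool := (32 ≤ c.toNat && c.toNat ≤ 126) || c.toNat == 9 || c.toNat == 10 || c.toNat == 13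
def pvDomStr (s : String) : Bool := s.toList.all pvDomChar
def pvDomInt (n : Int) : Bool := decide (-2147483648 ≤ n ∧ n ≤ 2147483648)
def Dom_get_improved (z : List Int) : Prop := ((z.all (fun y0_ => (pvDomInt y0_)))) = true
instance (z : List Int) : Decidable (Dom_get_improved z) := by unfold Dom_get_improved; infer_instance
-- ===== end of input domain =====

-- B materializes the prefix-minima table and selects drop points pairwise, instead of
-- A's two enumerate loops with a scalar running best (objective: alternative decomposition).

-- ===== PORT A =====
def get_improved (z : List Int) : List Int × List Int :=
  let best : Int := 100
  -- first loop: y.append(data); x.append(i)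
  let yx := (PySem.List.enumerate z).foldl
    (fun (s : List Int × List Int) (p : Int × Int) => (s.1 ++ [p.2], s.2 ++ [p.1])) ([], [])
  let y := yx.1
  let x := yx.2
  -- second loop over enumerate(y) with running best
  let r := (PySem.List.enumerate y).foldl
    (fun (s : Int × List Int × List Int) (p : Int × Int) =>
      if p.2 < s.1 then (p.2, s.2.1 ++ [PySem.List.pyGetD x p.1 0], s.2.2 ++ [p.2])
      else s) (best, ([], []))
  (r.2.1, r.2.2)

-- ===== PORT B =====
def get_improved_alt (z : List Int) : List Int × List Int :=
  let p := z.foldl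
    (fun (ps : List Int) d =>
      ps ++ [if d < PySem.List.pyGetD ps (-1) 0 then d else PySem.List.pyGetD ps (-1) 0])
    [100]
  let ix := (PySem.List.pyRange 0 z.length 1).filter
    (fun i => PySem.List.pyGetD p (i + 1) 0 < PySem.List.pyGetD p i 0)
  (ix, ix.map (fun i => PySem.List.pyGetD p (i + 1) 0))

-- ===== PRECONDITION & SPEC =====
def Spec_get_improved (z : List Int) (out : List Int × List Int) : Prop := out = get_improved_alt z
instance (z : List Int) (out : List Int × List Int) : Decidable (Spec_get_improved z out) := by unfold Spec_get_improved; infer_instance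

-- ===== CLAIM (what is proved, stated in full; the proofs are below) =====
def Claim_equal_get_improved : Prop := ∀ (z : List Int), Dom_get_improved z → Spec_get_improved z (get_improved z)

-- ===== LEMMAS AND PROOFS =====

/-- Reference recursion: running-minimum improvements with indices starting at `s`. -/
def pvRef (b : Int) (s : Int) : List Int → List Int × List Int
  | [] => ([], [])
  | d :: t => if d < b then ((s :: (pvRef d (s + 1) t).1), (d :: (pvRef d (s + 1) t).2))
              else pvRef b (s + 1) t

/-- Prefix minima of a list, seeded at `b` (the seed itself excluded). -/
def pvMins (b : Int) : List Int → List Int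
  | [] => []
  | d :: t => (if d < b then d else b) :: pvMins (if d < b then d else b) t

-- ---- A side ----

theorem pvA_first (L : List (Int × Int)) (ay ax : List Int) :
    L.foldl (fun (s : List Int × List Int) (p : Int × Int) => (s.1 ++ [p.2], s.2 ++ [p.1])) (ay, ax)
      = (ay ++ L.map (·.2), ax ++ L.map (·.1)) := by
  induction L generalizing ay ax with
  | nil => simp
  | cons h t ih => simp [List.foldl_cons, ih]


theorem pvA_second (l : List Int) (s b : Int) (ax ay : List Int) :
    ((PySem.List.enumerate l s).foldl
      (fun (st : Int × List Int × List Int) (p : Int × Int) =>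
        if p.2 < st.1 then (p.2, st.2.1 ++ [p.1], st.2.2 ++ [p.2]) else st)
      (b, (ax, ay))).2
      = (ax ++ (pvRef b s l).1, ay ++ (pvRef b s l).2) := by
  induction l generalizing s b ax ay with
  | nil => simp [PySem.List.enumerate_nil, pvRef]
  | cons d t ih =>
    rw [PySem.List.enumerate_cons]
    simp only [List.foldl_cons]
    by_cases h : d < b
    · simp only [if_pos h, ih]
      simp [pvRef, h]
    · simp only [if_neg h, ih]
      simp [pvRef, h]

-- ---- B side ----

theorem pvB_fold (l : List Int) (q : List Int) (hq : q ≠ []) :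
    l.foldl
      (fun (ps : List Int) d =>
        ps ++ [if d < PySem.List.pyGetD ps (-1) 0 then d else PySem.List.pyGetD ps (-1) 0]) q
      = q ++ pvMins (q.getLast hq) l := by
  induction l generalizing q with
  | nil => simp [pvMins]
  | cons d t ih =>
    rw [List.foldl_cons, PySem.List.pyGetD_neg_one q 0 hq,
        ih (q ++ [if d < q.getLast hq then d else q.getLast hq]) (by simp)]
    simp [pvMins]

theorem pvB_select (l : List Int) (b : Int) (s : Int) :
    ((((List.range l.length).filter
        (fun k => decide ((b :: pvMins b l).getD (k + 1) 0 < (b :: pvMins b l).getD k 0))).map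
          (fun (k : Nat) => s + (k : Int)),
      ((List.range l.length).filter
        (fun k => decide ((b :: pvMins b l).getD (k + 1) 0 < (b :: pvMins b l).getD k 0))).map
          (fun k => (b :: pvMins b l).getD (k + 1) 0)))
      = pvRef b s l := by
  induction l generalizing b s with
  | nil => simp [pvMins, pvRef]
  | cons d t ih =>
    have hm : pvMins b (d :: t) = (if d < b then d else b) :: pvMins (if d < b then d else b) t := rfl
    rw [hm, List.length_cons, List.range_succ_eq_map]
    by_cases h : d < b
    · simp only [pvRef, if_pos h]
      rw [← ih d (s + 1)]
      simp only [List.filter_cons, List.filter_map]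
      simp only [List.getD_cons_zero, List.getD_cons_succ, zero_add, h, decide_true, if_true,
        Nat.succ_eq_add_one, List.map_cons, List.map_map, Function.comp_def]
      refine congrArg₂ Prod.mk (congrArg₂ List.cons (by simp) ?_) rfl
      refine congrArg₂ List.map ?_ rfl
      funext k
      push_cast
      ring
    · simp only [pvRef, if_neg h]
      rw [← ih b (s + 1)]
      simp only [List.filter_cons, List.filter_map]
      simp only [List.getD_cons_zero, List.getD_cons_succ, zero_add, lt_irrefl, decide_false,
        Bool.false_eq_true, if_false, Nat.succ_eq_add_one, List.map_map, Function.comp_def]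
      refine congrArg₂ Prod.mk ?_ rfl
      refine congrArg₂ List.map ?_ rfl
      funext k
      push_cast
      ring

theorem pvFoldlCongr {α β : Type} (l : List α) (f g : β → α → β) (i : β)
    (h : ∀ b a, a ∈ l → f b a = g b a) : l.foldl f i = l.foldl g i := by
  induction l generalizing i with
  | nil => rfl
  | cons x xs ih => rw [List.foldl_cons, List.foldl_cons, h i x (by simp), ih]; intro b a ha; exact h b a (by simp [ha])

theorem pvA_eq (z : List Int) : get_improved z = pvRef 100 0 z := by
  simp only [get_improved, pvA_first, PySem.List.map_snd_enumerate, PySem.List.map_fst_enumerate,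
    List.nil_append, zero_add]
  rw [pvFoldlCongr (PySem.List.enumerate z 0) _
      (fun (st : Int × List Int × List Int) (p : Int × Int) =>
        if p.2 < st.1 then (p.2, st.2.1 ++ [p.1], st.2.2 ++ [p.2]) else st) _ ?_]
  · rw [pvA_second]
    simp
  · intro st p hp
    obtain ⟨k, hk, rfl⟩ := (PySem.List.mem_enumerate_iff z 0 p).1 hp
    have h0 : (0 : Int) + (k : Int) = ((k : Nat) : Int) := by ring
    simp only [h0, PySem.List.pyGetD_natCast]
    have hlen : k < (PySem.List.pyRange 0 (z.length : Int) 1).length := by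
      rw [PySem.List.length_pyRange_one]; omega
    rw [List.getD_eq_getElem _ _ hlen, PySem.List.getElem_pyRange_one]
    simp

theorem pvB_eq (z : List Int) : get_improved_alt z = pvRef 100 0 z := by
  simp only [get_improved_alt]
  rw [pvB_fold z [100] (by simp)]
  have hp : [(100 : Int)] ++ pvMins ([(100 : Int)].getLast (by simp)) z = 100 :: pvMins 100 z := by
    simp
  rw [hp, PySem.List.pyRange_one]
  have hlen : ((z.length : Int) - 0).toNat = z.length := by omega
  rw [hlen]
  rw [List.filter_map, List.map_map]
  have hpred : ((fun i => decide (PySem.List.pyGetD (100 :: pvMins 100 z) (i + 1) 0 <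
        PySem.List.pyGetD (100 :: pvMins 100 z) i 0)) ∘ (fun (k : Nat) => (0 : Int) + (k : Int)))
      = fun (k : Nat) => decide (((100 : Int) :: pvMins 100 z).getD (k + 1) 0 <
        ((100 : Int) :: pvMins 100 z).getD k 0) := by
    funext k
    have h0 : (0 : Int) + (k : Int) = ((k : Nat) : Int) := by ring
    have h1 : (k : Int) + 1 = ((k + 1 : Nat) : Int) := by push_cast; ring
    simp only [Function.comp_apply, h0, h1, PySem.List.pyGetD_natCast]
  rw [hpred]
  rw [← pvB_select z 100 0]
  refine congrArg₂ Prod.mk rfl ?_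
  refine congrArg₂ List.map ?_ rfl
  funext k
  have h1 : (0 : Int) + (k : Int) + 1 = ((k + 1 : Nat) : Int) := by push_cast; ring
  simp only [Function.comp_def, h1, PySem.List.pyGetD_natCast]

-- ===== VERDICT (by name: the statement is the Claim_ definition above) =====
theorem get_improved_spec : Claim_equal_get_improved := by
  intro z _
  show get_improved z = get_improved_alt z
  rw [pvA_eq, pvB_eq]
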